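/-
  THE CONTRACTS OF THE MDCT REGION (c/stb_vorbis_fixed.c; design/CONTRACTS.md entries 17, 30–34, 40, 102, 108, 110, 111), part 1:
  the shared vocabulary, the context-free functions and the five step-3 helpers.

      LiveBytes others frames a n     the BYTEWISE form of Basic.lean's `LiveIn`: the `n` bytes at `a` are live bytes of the shadow
                                      invariant's objects (`InLive (Live (stackObjs frames ++ others)) a n`). It is what an allocated
                                      block of the decoder invariant gives (`BlkLive Blk Live`, Vorbis/Blocks.lean: LIVENESS IS
                                      BYTEWISE), so it is what a function called with pointers into such blocks can be promised.
                                      `.of_liveIn .of_block .of_inLive .sub .byte .where_ .accSmall .block` mirror `LiveIn`'s lemmas;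
                                      `check_site`: a `Site` (the result of every USE lemma) → the walker's check goal
      arg32 u r, IsNeg32 u r k        a 32-bit `int` argument as a number (IRREDUCIBLE; `arg32_def` is in `vspec`); `arg32_sext`,
                                      `IsNeg32.sext`, `arg32_sar`, `add_mul4`, `add_neg_mul4`: the walker's `movsxd` / `sar` / `lea` terms as numbers
      InBody6 u₀ s entry depth ue ret v
                                      "inside the body of a function that pushed r15 r14 r13 r12 rbp rbx and lowered rsp": what EVERY
                                      cut-point assertion of the four segmented helpers shares (the entry state `ue` with its `AtEntry`
                                      and precondition, the code, the ABI invariant, the six save slots and the return address, the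
                                      footprint so far, the shadow untouched)
      get_window.spec  compute_bitreverse.spec  compute_window.spec  compute_twiddle_factors.spec  iter_54.spec
      imdct_step3_iter0_loop.spec / imdct_step3_inner_r_loop.spec / imdct_step3_inner_s_loop.spec / imdct_step3_inner_s_loop_ld654.spec
                                      with their cut-point assertions `<fn>.AtHead / AtBody / AtMid` (one family per function: the exit
                                      assertion of a segment IS the entry assertion of its successor)
      `square`'s Spec is `Vorbis.Spec.square.spec` of Vorbis/Spec/Leaves2.lean (pilot stage B); `sin` / `cos`: Vorbis/Spec/Libm.lean.

  ALL FLOATING-POINT VALUES ARE OPAQUE: no Spec says anything about an xmm register or about the contents of a float array.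
  Part 2 (init_blocksize, inverse_mdct): Vorbis/Spec/MdctTop.lean.
-/
import Vorbis.Spec.Basic
import Vorbis.Spec.Common
import Vorbis.Spec.Leaves2
import Vorbis.Spec.Libm
import Vorbis.Mdct
import Vorbis.ObjBlock
import Asan.CheckWalk
namespace Vorbis.Spec
open X86 X86.User Asan

/-! ### Inside the body of a function with six pushes -/

/-- **The stack of a function that has pushed r15 r14 r13 r12 rbp rbx (in this order) and lowered rsp to `ue.rsp − depth`**
(`ue` = the state at its first instruction): the return address and the six saved registers are still in their slots. The
form of the slot facts is the one `u_resolve` produces and the walker rewrites with. -/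
structure Frame6 (ue : State) (ret : Word) (depth : Word) (v : State) : Prop where
  /-- the steady stack pointer of the body -/
  rsp : v.reg .rsp = ue.reg .rsp - depth
  /-- the return address -/
  ret : UInt64.ofNat (v.mem.readLE (ue.reg .rsp) 8) = ret
  /-- the saved r15 -/
  r15 : UInt64.ofNat (v.mem.readLE (ue.reg .rsp - 8) 8) = ue.reg .r15
  /-- the saved r14 -/
  r14 : UInt64.ofNat (v.mem.readLE (ue.reg .rsp - 16) 8) = ue.reg .r14
  /-- the saved r13 -/
  r13 : UInt64.ofNat (v.mem.readLE (ue.reg .rsp - 24) 8) = ue.reg .r13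
  /-- the saved r12 -/
  r12 : UInt64.ofNat (v.mem.readLE (ue.reg .rsp - 32) 8) = ue.reg .r12
  /-- the saved rbp -/
  rbp : UInt64.ofNat (v.mem.readLE (ue.reg .rsp - 40) 8) = ue.reg .rbp
  /-- the saved rbx -/
  rbx : UInt64.ofNat (v.mem.readLE (ue.reg .rsp - 48) 8) = ue.reg .rbx

/-- **What every cut-point assertion of a segmented six-push function shares.** `ue` is the state at the function's first
instruction, entered by a `call` (`AtEntry`: return address `ret`, stack room for `s.frame` bytes, the code, the ABI invariant)
with the precondition of its contract `s`; `v` is the present state: the image's text is still that of the reference state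
`u₀` (the walker's span fact), DF = 0 and the SSE masks are set, the frame is intact, and so far only the contract's footprint
was written — no shadow byte. -/
structure InBody6 (u₀ : State) (s : Spec) (entry : Word) (depth : Word) (ue : State) (ret : Word) (v : State) : Prop where
  /-- the function was entered by a call -/
  entry : AtEntry (conv u₀) entry s.frame ret ue
  /-- … with its precondition -/
  pre : s.pre ue
  /-- the image's text is unchanged -/
  code : CodeOK u₀ v.mem
  /-- DF = 0, the six SSE exception masks set -/
  abi : abiInv v
  /-- the six save slots and the return address -/
  frame : Frame6 ue ret depth v
  /-- only the footprint was written -/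
  same : Mem.SameExcept (s.footprint ue) ue.mem v.mem
  /-- no shadow byte was written -/
  shadow : ShadowUntouched ue.mem v.mem

/-! ### `get_window` -/

/-- **`get_window(rdi = f, esi = len)`** (CONTRACTS 17; OB1: `*f` is live, 1808 bytes). With `t = (len + len) mod 2³²` (`lea
ebp, [rsi + rsi]`, FIX 15): rax = `f->window[0]` if `t` is the dword `f->blocksize_0` (offset 152), else `f->window[1]` if `t` is
`f->blocksize_1` (156), else 0 — compared as 32-bit patterns. (With HD3 + M3 + M7 a non-NULL result is the window block of exactly
`len` floats: `Mdct.get_window_arith`, `MdctOK.window_of_len`.) Writes nothing but its own 48 bytes of stack (two pushes, `sub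
rsp, 8`, the return address of a check call, that routine's worst case); no shadow byte is written. -/
def get_window.spec (others : List Obj) (frames : List (Nat × FrameLayout)) : Spec where
  pre u :=
    ShadowPre others frames u ∧
    LiveBytes others frames (u.reg .rdi).toNat Off.sizeof.stb_vorbis
  post u v :=
    ShadowUntouched u.mem v.mem ∧
    (u.mem.u32 ((u.reg .rdi).toNat + 152) = (2 * (u.reg .rsi).toNat) % 2 ^ 32 →
      (v.reg .rax).toNat = stb_vorbis.window u.mem (u.reg .rdi).toNat 0) ∧
    (u.mem.u32 ((u.reg .rdi).toNat + 152) ≠ (2 * (u.reg .rsi).toNat) % 2 ^ 32 →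
      u.mem.u32 ((u.reg .rdi).toNat + 156) = (2 * (u.reg .rsi).toNat) % 2 ^ 32 →
      (v.reg .rax).toNat = stb_vorbis.window u.mem (u.reg .rdi).toNat 1) ∧
    (u.mem.u32 ((u.reg .rdi).toNat + 152) ≠ (2 * (u.reg .rsi).toNat) % 2 ^ 32 →
      u.mem.u32 ((u.reg .rdi).toNat + 156) ≠ (2 * (u.reg .rsi).toNat) % 2 ^ 32 →
      v.reg .rax = 0)
  frame := 48
  writes _ := []

@[vspec] theorem get_window.spec_frame (others : List Obj) (frames : List (Nat × FrameLayout)) :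
    (get_window.spec others frames).frame = 48 := id rfl

@[vspec] theorem get_window.spec_writes (others : List Obj) (frames : List (Nat × FrameLayout)) (u : State) :
    (get_window.spec others frames).writes u = [] := id rfl

/-! ### `compute_bitreverse`, `compute_window`, `compute_twiddle_factors` -/

/-- **`compute_bitreverse(edi = n, rsi = rev)`** (CONTRACTS 102): `n = 2 ^ k`, `6 ≤ k ≤ 13` (`Mdct.Ld n k`, `k` a ghost: the `ld`
of the C source); the `n / 4` bytes at `rev` (`n / 8` `uint16`) are live; the global `log2_4` is a live object with its
contents (SH5 + SH7: `ilog(n) = k + 1`, `Vorbis.Spec.ilogVal_two_pow`). POST = M4 for this table: every entry is at most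
`n / 2 − 4` (`Mdct.RevOK`; loop invariant `Mdct.RevUpTo`, the stored value by `Mdct.rev_value`: the shift count `35 − k` is in
`22 .. 29` by `Mdct.shift_count` from `6 ≤ k ≤ 13`). Writes `[rev, rev + n / 4)` and its own 96 bytes of stack (six pushes, `sub
rsp, 8`, the return address of the call of `ilog`, its 32); no shadow byte is written. -/
def compute_bitreverse.spec (others : List Obj) (frames : List (Nat × FrameLayout)) (k : Nat) : Spec where
  pre u :=
    ShadowPre others frames u ∧
    Mdct.Ld (arg32 u .rdi) k ∧
    LiveBytes others frames (u.reg .rsi).toNat (arg32 u .rdi / 4) ∧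
    Vorbis.Globals.log2_4.obj ∈ others ∧
    Log2_4In u.mem
  post u v :=
    ShadowUntouched u.mem v.mem ∧
    Mdct.RevOK v.mem (u.reg .rsi).toNat (arg32 u .rdi)
  frame := 96
  writes u := [⟨(u.reg .rsi).toNat, (u.reg .rsi).toNat + arg32 u .rdi / 4⟩]

@[vspec] theorem compute_bitreverse.spec_frame (others : List Obj) (frames : List (Nat × FrameLayout)) (k : Nat) :
    (compute_bitreverse.spec others frames k).frame = 96 := id rfl

@[vspec] theorem compute_bitreverse.spec_writes (others : List Obj) (frames : List (Nat × FrameLayout)) (k : Nat) (u : State) :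
    (compute_bitreverse.spec others frames k).writes u =
      [⟨(u.reg .rsi).toNat, (u.reg .rsi).toNat + arg32 u .rdi / 4⟩] := id rfl

/-- **`compute_window(edi = n, rsi = window)`** (CONTRACTS 110): `0 ≤ n` as an `int`, and the `n >> 1` floats at `window` are
live. Writes them all (opaque floats), and its own 80 bytes of stack (five pushes, the return address of the call of `sin`,
its 32); no shadow byte is written. -/
def compute_window.spec (others : List Obj) (frames : List (Nat × FrameLayout)) : Spec where
  pre u :=
    ShadowPre others frames u ∧
    arg32 u .rdi < 2 ^ 31 ∧
    LiveBytes others frames (u.reg .rsi).toNat (4 * (arg32 u .rdi / 2))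
  post u v :=
    ShadowUntouched u.mem v.mem
  frame := 80
  writes u := [⟨(u.reg .rsi).toNat, (u.reg .rsi).toNat + 4 * (arg32 u .rdi / 2)⟩]

@[vspec] theorem compute_window.spec_frame (others : List Obj) (frames : List (Nat × FrameLayout)) :
    (compute_window.spec others frames).frame = 80 := id rfl

@[vspec] theorem compute_window.spec_writes (others : List Obj) (frames : List (Nat × FrameLayout)) (u : State) :
    (compute_window.spec others frames).writes u =
      [⟨(u.reg .rsi).toNat, (u.reg .rsi).toNat + 4 * (arg32 u .rdi / 2)⟩] := id rfl

/-- **`compute_twiddle_factors(edi = n, rsi = A, rdx = B, rcx = C)`** (CONTRACTS 108): `n` a legal block size; the `n / 2`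
floats at `A`, the `n / 2` at `B`, the `n / 4` at `C` are live. Writes them all (opaque floats), and its own 160 bytes of stack
(six pushes, `sub rsp, 48H`, the return address of a call of `sin` / `cos`, their 32); no shadow byte is written. -/
def compute_twiddle_factors.spec (others : List Obj) (frames : List (Nat × FrameLayout)) : Spec where
  pre u :=
    ShadowPre others frames u ∧
    Mdct.IsBlocksize (arg32 u .rdi) ∧
    LiveBytes others frames (u.reg .rsi).toNat (2 * arg32 u .rdi) ∧
    LiveBytes others frames (u.reg .rdx).toNat (2 * arg32 u .rdi) ∧
    LiveBytes others frames (u.reg .rcx).toNat (arg32 u .rdi)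
  post u v :=
    ShadowUntouched u.mem v.mem
  frame := 160
  writes u :=
    [⟨(u.reg .rsi).toNat, (u.reg .rsi).toNat + 2 * arg32 u .rdi⟩,
     ⟨(u.reg .rdx).toNat, (u.reg .rdx).toNat + 2 * arg32 u .rdi⟩,
     ⟨(u.reg .rcx).toNat, (u.reg .rcx).toNat + arg32 u .rdi⟩]

@[vspec] theorem compute_twiddle_factors.spec_frame (others : List Obj) (frames : List (Nat × FrameLayout)) :
    (compute_twiddle_factors.spec others frames).frame = 160 := id rfl

@[vspec] theorem compute_twiddle_factors.spec_writes (others : List Obj) (frames : List (Nat × FrameLayout)) (u : State) :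
    (compute_twiddle_factors.spec others frames).writes u =
      [⟨(u.reg .rsi).toNat, (u.reg .rsi).toNat + 2 * arg32 u .rdi⟩,
       ⟨(u.reg .rdx).toNat, (u.reg .rdx).toNat + 2 * arg32 u .rdi⟩,
       ⟨(u.reg .rcx).toNat, (u.reg .rcx).toNat + arg32 u .rdi⟩] := id rfl

/-! ### `iter_54` -/

/-- **`iter_54(rdi = z)`** (CONTRACTS 33): the eight floats `z[−7 .. 0]`, i.e. the 32 bytes `[z − 28, z + 4)`, are live.
Overwrites them (opaque floats); eight `load4` checks, the eight stores go to addresses checked before. Its own 80 bytes of stack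
(four pushes, `sub rsp, 18H`, the return address of a check call, that routine's worst case); no shadow byte is written. -/
def iter_54.spec (others : List Obj) (frames : List (Nat × FrameLayout)) : Spec where
  pre u :=
    ShadowPre others frames u ∧
    28 ≤ (u.reg .rdi).toNat ∧
    LiveBytes others frames ((u.reg .rdi).toNat - 28) 32
  post u v :=
    ShadowUntouched u.mem v.mem
  frame := 80
  writes u := [⟨(u.reg .rdi).toNat - 28, (u.reg .rdi).toNat + 4⟩]

@[vspec] theorem iter_54.spec_frame (others : List Obj) (frames : List (Nat × FrameLayout)) :
    (iter_54.spec others frames).frame = 80 := id rfl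

@[vspec] theorem iter_54.spec_writes (others : List Obj) (frames : List (Nat × FrameLayout)) (u : State) :
    (iter_54.spec others frames).writes u = [⟨(u.reg .rdi).toNat - 28, (u.reg .rdi).toNat + 4⟩] := id rfl

/-- A live range of the shadow invariant's objects IS a live block of the predicate files (`PairDown.inLive0`, `floats_inLive`,
`site_f32_live` take `(Block.mk p sz).live Live`). -/
theorem LiveBytes.block {others : List Obj} {frames : List (Nat × FrameLayout)} {p sz : Nat}
    (h : LiveBytes others frames p sz) : (Block.mk p sz).live (Live (stackObjs frames ++ others)) := h

/-! ### The step-3 helpers: common shape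

Each of the four loops walks DOWN the first half of the sample buffer `e` (floats; `e` = rsi at entry) and reads twiddle factors
upwards from `A`. The contract names the buffer block and the index shape as ghosts — `len` floats at `e` are live, and the runs
the loop touches lie inside `e[0 .. len)` by `Mdct.PairDown` / `Mdct.StrideDown` (Vorbis/Mdct/Step3.lean: produced at
inverse_mdct's call sites by `Mdct.Call.iter0 / r1 / firstL_call / secondL_call / ld654`, consumed inside by `PairDown.inLive0 /
inLive2`, `StrideDown.inLive0 / inLive2`, then `Mdct.site_f32_down` + `check_site`, or `LiveBytes.accSmall`). The integer
arguments are the low halves of their registers (`arg32`); `k_off` is NEGATIVE at every call site: `IsNeg32 u .rcx koff` says the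
register holds `−koff`. A pointer that walks down is tied to the iteration number `t` by a SUM (`r12 + 32 t = e + 4 i0`), valid
also for the exit value where the step is a CONSTANT (iter0 / r_loop: 32 bytes, ld654: 64 bytes — the precondition bounds `8 m` /
`16 n'` floats, one step more than the last access, and `e ≥ 100000H`). NOT in imdct_step3_inner_s_loop: its step is `4 k0` bytes and
the precondition bounds `k0 (n' − 1)` only, so `ee0 -= k0; ee2 -= k0;` of the LAST iteration may wrap below 0 (the pointers are dead
then): there the two sums are asserted for `s < n'` only (`Loop.ee0 / ee2`). No wrap-around of a pointer that is USED: the block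
is live, hence inside `[100000H, C00000H)` (`LiveBytes.where_`). -/

/-! ### `imdct_step3_iter0_loop` -/

/-- The iteration count `m = n' >> 2` of imdct_step3_iter0_loop and imdct_step3_inner_r_loop (`sar edi, 2` of a non-negative
`int`). -/
def quarter (ue : State) : Nat := arg32 ue .rdi / 4

/-- `quarter` unfolded (in the simp set `vspec`). -/
@[vspec] theorem quarter_def (ue : State) : quarter ue = (ue.reg .rdi).toNat % 2 ^ 32 / 4 := by
  unfold quarter
  rw [arg32_def]

/- An atom for the frame tactics, like `arg32`. -/
attribute [irreducible] quarter

/-- **`imdct_step3_iter0_loop(edi = n', rsi = e, edx = i_off, ecx = k_off, r8 = A)`** (CONTRACTS 30), ghosts `len i0 koff`: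
`0 ≤ n'`, `i_off = i0`, `k_off = −koff`; with `m = n' >> 2`: the two runs of `8 m` floats `e[i0 − 8m + 1 .. i0]` and the same
shifted down by `koff` lie in `e[0 .. len)` (`PairDown len i0 koff (8 m)`), whose `4 len` bytes are live; for `m ≥ 1` the floats
`A[0 .. 32 m − 7]` are live. Overwrites the two runs (opaque floats) and nothing else: 24 `load4` checks per iteration, the 16
stores go to addresses checked before in the same iteration. `m = 0`: no memory access. Its own 96 bytes of stack (six pushes,
`sub rsp, 18H`, the return address of a check call, that routine's worst case); no shadow byte is written.
(CONTRACTS allows `n' < 0` = "nothing happens"; no caller passes one, the contract asks for `0 ≤ n'`.) -/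
def imdct_step3_iter0_loop.spec (others : List Obj) (frames : List (Nat × FrameLayout)) (len i0 koff : Nat) : Spec where
  pre u :=
    ShadowPre others frames u ∧
    arg32 u .rdi < 2 ^ 31 ∧
    arg32 u .rdx = i0 ∧
    IsNeg32 u .rcx koff ∧
    Mdct.PairDown len i0 koff (8 * quarter u) ∧
    LiveBytes others frames (u.reg .rsi).toNat (4 * len) ∧
    (1 ≤ quarter u → LiveBytes others frames (u.reg .r8).toNat (4 * (32 * quarter u - 6)))
  post u v :=
    ShadowUntouched u.mem v.mem
  frame := 96
  writes u :=
    [⟨(u.reg .rsi).toNat + 4 * (i0 + 1 - 8 * quarter u), (u.reg .rsi).toNat + 4 * (i0 + 1)⟩,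
     ⟨(u.reg .rsi).toNat + 4 * (i0 + 1 - koff - 8 * quarter u), (u.reg .rsi).toNat + 4 * (i0 + 1 - koff)⟩]

@[vspec] theorem imdct_step3_iter0_loop.spec_frame (others : List Obj) (frames : List (Nat × FrameLayout)) (len i0 koff : Nat) :
    (imdct_step3_iter0_loop.spec others frames len i0 koff).frame = 96 := id rfl

@[vspec] theorem imdct_step3_iter0_loop.spec_writes (others : List Obj) (frames : List (Nat × FrameLayout)) (len i0 koff : Nat)
    (u : State) :
    (imdct_step3_iter0_loop.spec others frames len i0 koff).writes u =
      [⟨(u.reg .rsi).toNat + 4 * (i0 + 1 - 8 * quarter u), (u.reg .rsi).toNat + 4 * (i0 + 1)⟩,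
       ⟨(u.reg .rsi).toNat + 4 * (i0 + 1 - koff - 8 * quarter u), (u.reg .rsi).toNat + 4 * (i0 + 1 - koff)⟩] := id rfl

namespace imdct_step3_iter0_loop

/-- **The loop invariant of imdct_step3_iter0_loop** (loop 2442, head `loop1`) after `t` iterations, entry state `ue`:
`r14d = m − t`, `r12 = ee0 − 32 t`, `rbx = ee2 − 32 t` (bytes; `ee0 = e + 4 i0`, `ee2 = ee0 − 4 koff`), `rbp = A + 128 t`; steady
`rsp = ue.rsp − 72`. r13d, r15d and the float scratch at `[rsp + 4 .. rsp + 16)` are dead at every cut. -/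
structure Loop (u₀ : State) (others : List Obj) (frames : List (Nat × FrameLayout)) (len i0 koff : Nat) (ue : State)
    (ret : Word) (t : Nat) (v : State) : Prop where
  /-- the frame, the footprint so far, the entry facts -/
  body : InBody6 u₀ (spec others frames len i0 koff) L.imdct_step3_iter0_loop.entry 72 ue ret v
  /-- at most `m` iterations are done -/
  le : t ≤ quarter ue
  /-- `r14d = m − t` (the upper half of r14 is 0) -/
  cnt : (v.reg .r14).toNat = quarter ue - t
  /-- `r12 = ee0 − 32 t` -/
  ee0 : (v.reg .r12).toNat + 32 * t = (ue.reg .rsi).toNat + 4 * i0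
  /-- `rbx = ee2 − 32 t` -/
  ee2 : (v.reg .rbx).toNat + 32 * t + 4 * koff = (ue.reg .rsi).toNat + 4 * i0
  /-- `rbp = A + 128 t` -/
  A : (v.reg .rbp).toNat = (ue.reg .r8).toNat + 128 * t

/-- At the loop head `loop1` (`test r14d, r14d ; jg body`): the invariant. -/
def AtHead (u₀ : State) (others : List Obj) (frames : List (Nat × FrameLayout)) (len i0 koff : Nat) (ue : State)
    (ret : Word) (t : Nat) (v : State) : Prop :=
  v.rip = L.imdct_step3_iter0_loop.loop1 ∧ Loop u₀ others frames len i0 koff ue ret t v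

/-- At the first instruction of the body `cut1` (reached only from the head's `jg`): the invariant and `t < m`. -/
def AtBody (u₀ : State) (others : List Obj) (frames : List (Nat × FrameLayout)) (len i0 koff : Nat) (ue : State)
    (ret : Word) (t : Nat) (v : State) : Prop :=
  v.rip = L.imdct_step3_iter0_loop.cut1 ∧ Loop u₀ others frames len i0 koff ue ret t v ∧ t < quarter ue

/-- In the middle of the body `cut2` (after quarters 0 and 1; the pointers do not move inside the body): the same. -/
def AtMid (u₀ : State) (others : List Obj) (frames : List (Nat × FrameLayout)) (len i0 koff : Nat) (ue : State)
    (ret : Word) (t : Nat) (v : State) : Prop :=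
  v.rip = L.imdct_step3_iter0_loop.cut2 ∧ Loop u₀ others frames len i0 koff ue ret t v ∧ t < quarter ue

/-- **Segment 1** (prologue, `ee0` / `ee2` / `i` set-up): from the entry with the precondition to the loop head with `t = 0`. -/
def Seg1 (Lay : Layout) (μ : Microarch) (u₀ : State) : Prop :=
  ∀ (others : List Obj) (frames : List (Nat × FrameLayout)) (len i0 koff : Nat) (ue : State) (ret : Word),
    AtEntry (conv u₀) L.imdct_step3_iter0_loop.entry (spec others frames len i0 koff).frame ret ue →
    (spec others frames len i0 koff).pre ue →
    ReachVia Lay μ WayInv ue (fun w => AtHead u₀ others frames len i0 koff ue ret 0 w)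

/-- **Segment 2** (body, quarters 0 and 1: `e` offsets 0 … −3, `A + {0, 4, 20H, 24H}`; 12 checks): to the middle of the body. -/
def Seg2 (Lay : Layout) (μ : Microarch) (u₀ : State) : Prop :=
  ∀ (others : List Obj) (frames : List (Nat × FrameLayout)) (len i0 koff : Nat) (ue : State) (ret : Word) (t : Nat) (v : State),
    AtBody u₀ others frames len i0 koff ue ret t v →
    ReachVia Lay μ WayInv v (fun w => AtMid u₀ others frames len i0 koff ue ret t w)

/-- **Segment 3** (body, quarters 2 and 3; `A += 32`, `ee0 −= 8`, `ee2 −= 8`, `--i`; 12 checks): back to the head with `t + 1`. -/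
def Seg3 (Lay : Layout) (μ : Microarch) (u₀ : State) : Prop :=
  ∀ (others : List Obj) (frames : List (Nat × FrameLayout)) (len i0 koff : Nat) (ue : State) (ret : Word) (t : Nat) (v : State),
    AtMid u₀ others frames len i0 koff ue ret t v →
    ReachVia Lay μ WayInv v (fun w => AtHead u₀ others frames len i0 koff ue ret (t + 1) w)

/-- **Segment 4** (loop test + epilogue): from the head into the body (`t < m`), or through the epilogue to the state after the
`ret` (`t = m`): the contract's `Returned`. -/
def Seg4 (Lay : Layout) (μ : Microarch) (u₀ : State) : Prop :=
  ∀ (others : List Obj) (frames : List (Nat × FrameLayout)) (len i0 koff : Nat) (ue : State) (ret : Word) (t : Nat) (v : State),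
    AtHead u₀ others frames len i0 koff ue ret t v →
    ReachVia Lay μ WayInv v (fun w => AtBody u₀ others frames len i0 koff ue ret t w ∨
      Returned (conv u₀) (spec others frames len i0 koff) ue ret w)

end imdct_step3_iter0_loop

/-! ### `imdct_step3_inner_r_loop` -/

/-- **`imdct_step3_inner_r_loop(edi = lim, rsi = e, edx = d0, ecx = k_off, r8 = A, r9d = k1)`** (CONTRACTS 31), ghosts
`len i0 koff k1`: `0 ≤ lim`, `d0 = i0`, `k_off = −koff`, `0 ≤ k1` as an `int`; with `m = lim >> 2`: the two runs of `8 m` floats lie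
in `e[0 .. len)` (`PairDown len i0 koff (8 m)`), whose `4 len` bytes are live; for `m ≥ 1` the floats `A[0 .. k1 (4m − 1) + 1]`
are live (`A` advances by `k1` floats after each quarter: `Mdct.RLoop.A`). Overwrites the two runs (opaque) and nothing else;
`m = 0` (block size 64 at the first four call sites): no memory access besides the stack. Its own 112 bytes of stack (six
pushes, `sub rsp, 28H`, a check call's return address and worst case); no shadow byte is written. -/
def imdct_step3_inner_r_loop.spec (others : List Obj) (frames : List (Nat × FrameLayout)) (len i0 koff k1 : Nat) : Spec where
  pre u :=
    ShadowPre others frames u ∧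
    arg32 u .rdi < 2 ^ 31 ∧
    arg32 u .rdx = i0 ∧
    IsNeg32 u .rcx koff ∧
    arg32 u .r9 = k1 ∧
    k1 < 2 ^ 31 ∧
    Mdct.PairDown len i0 koff (8 * quarter u) ∧
    LiveBytes others frames (u.reg .rsi).toNat (4 * len) ∧
    (1 ≤ quarter u → LiveBytes others frames (u.reg .r8).toNat (4 * (k1 * (4 * quarter u - 1) + 2)))
  post u v :=
    ShadowUntouched u.mem v.mem
  frame := 112
  writes u :=
    [⟨(u.reg .rsi).toNat + 4 * (i0 + 1 - 8 * quarter u), (u.reg .rsi).toNat + 4 * (i0 + 1)⟩,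
     ⟨(u.reg .rsi).toNat + 4 * (i0 + 1 - koff - 8 * quarter u), (u.reg .rsi).toNat + 4 * (i0 + 1 - koff)⟩]

@[vspec] theorem imdct_step3_inner_r_loop.spec_frame (others : List Obj) (frames : List (Nat × FrameLayout))
    (len i0 koff k1 : Nat) : (imdct_step3_inner_r_loop.spec others frames len i0 koff k1).frame = 112 := id rfl

@[vspec] theorem imdct_step3_inner_r_loop.spec_writes (others : List Obj) (frames : List (Nat × FrameLayout))
    (len i0 koff k1 : Nat) (u : State) :
    (imdct_step3_inner_r_loop.spec others frames len i0 koff k1).writes u =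
      [⟨(u.reg .rsi).toNat + 4 * (i0 + 1 - 8 * quarter u), (u.reg .rsi).toNat + 4 * (i0 + 1)⟩,
       ⟨(u.reg .rsi).toNat + 4 * (i0 + 1 - koff - 8 * quarter u), (u.reg .rsi).toNat + 4 * (i0 + 1 - koff)⟩] := id rfl

namespace imdct_step3_inner_r_loop

/-- **The loop invariant of imdct_step3_inner_r_loop** (loop 2488, head `loop1`) after `t` iterations and `q` of the four
quarters of the running iteration (`q = 0` at the head and at the first instruction of the body, `q = 2` in the middle):
`r15d = m − t`, `r12 = e0 − 32 t`, `rbp = e2 − 32 t`, `rbx = A + 4 k1 (4 t + q)`, the dword `[rsp + 1CH] = k1`; steady `rsp =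
ue.rsp − 88`. r13 (dual use), r14d and the float scratch at `[rsp + 0CH .. rsp + 1CH)` are dead at the head and at `cut1`. -/
structure Loop (u₀ : State) (others : List Obj) (frames : List (Nat × FrameLayout)) (len i0 koff k1 : Nat) (ue : State)
    (ret : Word) (t q : Nat) (v : State) : Prop where
  /-- the frame, the footprint so far, the entry facts -/
  body : InBody6 u₀ (spec others frames len i0 koff k1) L.imdct_step3_inner_r_loop.entry 88 ue ret v
  /-- at most `m` iterations are done -/
  le : t ≤ quarter ue
  /-- `r15d = m − t` (the upper half of r15 is 0) -/
  cnt : (v.reg .r15).toNat = quarter ue - t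
  /-- `r12 = e0 − 32 t` -/
  e0 : (v.reg .r12).toNat + 32 * t = (ue.reg .rsi).toNat + 4 * i0
  /-- `rbp = e2 − 32 t` -/
  e2 : (v.reg .rbp).toNat + 32 * t + 4 * koff = (ue.reg .rsi).toNat + 4 * i0
  /-- `rbx = A + 4 k1 (4 t + q)` -/
  A : (v.reg .rbx).toNat = (ue.reg .r8).toNat + 4 * (k1 * (4 * t + q))
  /-- the spilled `k1`: the dword at `[rsp + 1CH]` -/
  k1slot : v.mem.readLE (ue.reg .rsp - 60) 4 = k1

/-- At the loop head `loop1` (`test r15d, r15d ; jg body`): the invariant, no quarter of iteration `t` done. -/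
def AtHead (u₀ : State) (others : List Obj) (frames : List (Nat × FrameLayout)) (len i0 koff k1 : Nat) (ue : State)
    (ret : Word) (t : Nat) (v : State) : Prop :=
  v.rip = L.imdct_step3_inner_r_loop.loop1 ∧ Loop u₀ others frames len i0 koff k1 ue ret t 0 v

/-- At the first instruction of the body `cut1`: the invariant and `t < m`. -/
def AtBody (u₀ : State) (others : List Obj) (frames : List (Nat × FrameLayout)) (len i0 koff k1 : Nat) (ue : State)
    (ret : Word) (t : Nat) (v : State) : Prop :=
  v.rip = L.imdct_step3_inner_r_loop.cut1 ∧ Loop u₀ others frames len i0 koff k1 ue ret t 0 v ∧ t < quarter ue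

/-- In the middle of the body `cut2` (after the second `A += k1`): two quarters done, `r13 = 4 k1` (reloaded from the slot in
every iteration, live to the end of the body), `t < m`. -/
def AtMid (u₀ : State) (others : List Obj) (frames : List (Nat × FrameLayout)) (len i0 koff k1 : Nat) (ue : State)
    (ret : Word) (t : Nat) (v : State) : Prop :=
  v.rip = L.imdct_step3_inner_r_loop.cut2 ∧ Loop u₀ others frames len i0 koff k1 ue ret t 2 v ∧ t < quarter ue ∧
    (v.reg .r13).toNat = 4 * k1

/-- **Segment 1** (prologue, `k1` spilled, `e0` / `e2` / `i` set-up): to the loop head with `t = 0`. -/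
def Seg1 (Lay : Layout) (μ : Microarch) (u₀ : State) : Prop :=
  ∀ (others : List Obj) (frames : List (Nat × FrameLayout)) (len i0 koff k1 : Nat) (ue : State) (ret : Word),
    AtEntry (conv u₀) L.imdct_step3_inner_r_loop.entry (spec others frames len i0 koff k1).frame ret ue →
    (spec others frames len i0 koff k1).pre ue →
    ReachVia Lay μ WayInv ue (fun w => AtHead u₀ others frames len i0 koff k1 ue ret 0 w)

/-- **Segment 2** (body, quarters 0 and 1, two `A += k1`; 12 checks): to the middle of the body. -/
def Seg2 (Lay : Layout) (μ : Microarch) (u₀ : State) : Prop :=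
  ∀ (others : List Obj) (frames : List (Nat × FrameLayout)) (len i0 koff k1 : Nat) (ue : State) (ret : Word) (t : Nat)
    (v : State),
    AtBody u₀ others frames len i0 koff k1 ue ret t v →
    ReachVia Lay μ WayInv v (fun w => AtMid u₀ others frames len i0 koff k1 ue ret t w)

/-- **Segment 3** (body, quarters 2 and 3, two `A += k1`, `e0 −= 8`, `e2 −= 8`, `--i`; 12 checks): to the head with `t + 1`. -/
def Seg3 (Lay : Layout) (μ : Microarch) (u₀ : State) : Prop :=
  ∀ (others : List Obj) (frames : List (Nat × FrameLayout)) (len i0 koff k1 : Nat) (ue : State) (ret : Word) (t : Nat)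
    (v : State),
    AtMid u₀ others frames len i0 koff k1 ue ret t v →
    ReachVia Lay μ WayInv v (fun w => AtHead u₀ others frames len i0 koff k1 ue ret (t + 1) w)

/-- **Segment 4** (loop test + epilogue): into the body (`t < m`), or to the state after the `ret` (`t = m`). -/
def Seg4 (Lay : Layout) (μ : Microarch) (u₀ : State) : Prop :=
  ∀ (others : List Obj) (frames : List (Nat × FrameLayout)) (len i0 koff k1 : Nat) (ue : State) (ret : Word) (t : Nat)
    (v : State),
    AtHead u₀ others frames len i0 koff k1 ue ret t v →
    ReachVia Lay μ WayInv v (fun w => AtBody u₀ others frames len i0 koff k1 ue ret t w ∨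
      Returned (conv u₀) (spec others frames len i0 koff k1) ue ret w)

end imdct_step3_inner_r_loop

/-! ### `imdct_step3_inner_s_loop` -/

/-- **`imdct_step3_inner_s_loop(edi = n', rsi = e, edx = i_off, ecx = k_off, r8 = A, r9d = a_off, [rsp + 8] = k0)`**
(CONTRACTS 32), ghosts `len i0 koff k0 aoff`: `0 ≤ n'`, `i_off = i0`, `k_off = −koff`, `a_off = aoff < 2²⁹` (`2 a_off`, `3 a_off`
are computed in 32 bits), the dword of the seventh argument at `[rsp + 8]` is `k0`, `0 ≤ k0` as an `int`; the `2 n'` groups of 8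
floats `e[i0 − k0 s − 7 .. i0 − k0 s]` and the same shifted down by `koff`, `s < n'`, lie in `e[0 .. len)` (`StrideDown len i0 koff
k0 n'`), whose `4 len` bytes are live; the eight floats `A[j a_off + d]`, `j ≤ 3`, `d ≤ 1` — read BEFORE the loop, also when
`n' = 0` — are live: `A[0 .. 3 a_off + 1]`. Overwrites those groups (opaque). FOOTPRINT: the hull of the groups, ONE window
`e[i0 − koff − k0 (n' − 1) − 7 .. i0]` (CONTRACTS lists the `2 n'` groups; no caller needs more than "inside `e[0 .. len)`").
Its own 128 bytes of stack (six pushes, `sub rsp, 38H`, a check call's return address and worst case); no shadow byte is written. -/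
def imdct_step3_inner_s_loop.spec (others : List Obj) (frames : List (Nat × FrameLayout)) (len i0 koff k0 aoff : Nat) :
    Spec where
  pre u :=
    ShadowPre others frames u ∧
    arg32 u .rdi < 2 ^ 31 ∧
    arg32 u .rdx = i0 ∧
    IsNeg32 u .rcx koff ∧
    arg32 u .r9 = aoff ∧
    aoff < 2 ^ 29 ∧
    u.mem.readLE (u.reg .rsp + 8) 4 = k0 ∧
    k0 < 2 ^ 31 ∧
    Mdct.StrideDown len i0 koff k0 (arg32 u .rdi) ∧
    LiveBytes others frames (u.reg .rsi).toNat (4 * len) ∧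
    LiveBytes others frames (u.reg .r8).toNat (4 * (3 * aoff + 2))
  post u v :=
    ShadowUntouched u.mem v.mem
  frame := 128
  writes u :=
    [⟨(u.reg .rsi).toNat + 4 * (i0 - koff - k0 * (arg32 u .rdi - 1) - 7), (u.reg .rsi).toNat + 4 * (i0 + 1)⟩]

@[vspec] theorem imdct_step3_inner_s_loop.spec_frame (others : List Obj) (frames : List (Nat × FrameLayout))
    (len i0 koff k0 aoff : Nat) : (imdct_step3_inner_s_loop.spec others frames len i0 koff k0 aoff).frame = 128 := id rfl

@[vspec] theorem imdct_step3_inner_s_loop.spec_writes (others : List Obj) (frames : List (Nat × FrameLayout))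
    (len i0 koff k0 aoff : Nat) (u : State) :
    (imdct_step3_inner_s_loop.spec others frames len i0 koff k0 aoff).writes u =
      [⟨(u.reg .rsi).toNat + 4 * (i0 - koff - k0 * (arg32 u .rdi - 1) - 7), (u.reg .rsi).toNat + 4 * (i0 + 1)⟩] := id rfl

namespace imdct_step3_inner_s_loop

/-- **The loop invariant of imdct_step3_inner_s_loop** (loop 2547, head `loop1`) after `s` iterations: `r13d = n' − s`, `r15d =
k0`, and WHILE AN ITERATION IS STILL TO COME (`s < n'`) `rbp = ee0 − 4 k0 s`, `rbx = ee2 − 4 k0 s`; steady `rsp = ue.rsp − 104`. The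
eight twiddle factors A0 … A7 are opaque floats in the slots `[rsp + 0CH .. rsp + 2CH)`; r12d, r14d and the dword `[rsp + 8]`
(float scratch in the loop) are dead at the cuts. THE TWO POINTER FIELDS ARE GUARDED BY `s < n'`: the body ends with `ee0 -= k0;
ee2 -= k0;` (0x1062b2, 0x1062b5; C lines 2576–2577) also in the last iteration, and the precondition (`StrideDown.lo`) bounds
`k0 (n' − 1)`, not `k0 n'` — for `s = n'` the registers hold `ee − 4 k0 n'` modulo 2⁶⁴, possibly wrapped, and are dead (the
epilogue pops rbp and rbx). Segment 1 proves the fields under `intro`, segment 2 from `s + 1 < n'`, segment 3 hands them on. -/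
structure Loop (u₀ : State) (others : List Obj) (frames : List (Nat × FrameLayout)) (len i0 koff k0 aoff : Nat) (ue : State)
    (ret : Word) (s : Nat) (v : State) : Prop where
  /-- the frame, the footprint so far, the entry facts -/
  body : InBody6 u₀ (spec others frames len i0 koff k0 aoff) L.imdct_step3_inner_s_loop.entry 104 ue ret v
  /-- at most `n'` iterations are done -/
  le : s ≤ arg32 ue .rdi
  /-- `r13d = n' − s` (the upper half of r13 is 0) -/
  cnt : (v.reg .r13).toNat = arg32 ue .rdi - s
  /-- `r15d = k0` (the upper half of r15 is 0) -/
  k0reg : (v.reg .r15).toNat = k0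
  /-- `rbp = ee0 − 4 k0 s`, while an iteration is still to come (after the last one the pointer is dead and may have wrapped) -/
  ee0 : s < arg32 ue .rdi → (v.reg .rbp).toNat + 4 * (k0 * s) = (ue.reg .rsi).toNat + 4 * i0
  /-- `rbx = ee2 − 4 k0 s`, while an iteration is still to come (after the last one the pointer is dead and may have wrapped) -/
  ee2 : s < arg32 ue .rdi → (v.reg .rbx).toNat + 4 * (k0 * s) + 4 * koff = (ue.reg .rsi).toNat + 4 * i0

/-- At the loop head `loop1` (`test r13d, r13d ; jg body`): the invariant. -/
def AtHead (u₀ : State) (others : List Obj) (frames : List (Nat × FrameLayout)) (len i0 koff k0 aoff : Nat) (ue : State)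
    (ret : Word) (s : Nat) (v : State) : Prop :=
  v.rip = L.imdct_step3_inner_s_loop.loop1 ∧ Loop u₀ others frames len i0 koff k0 aoff ue ret s v

/-- At the first instruction of the body `cut1`: the invariant and `s < n'`. -/
def AtBody (u₀ : State) (others : List Obj) (frames : List (Nat × FrameLayout)) (len i0 koff k0 aoff : Nat) (ue : State)
    (ret : Word) (s : Nat) (v : State) : Prop :=
  v.rip = L.imdct_step3_inner_s_loop.cut1 ∧ Loop u₀ others frames len i0 koff k0 aoff ue ret s v ∧ s < arg32 ue .rdi

/-- **Segment 1** (prologue: A0 … A7 loaded with 8 checks and spilled, `ee0` / `ee2` set-up): to the loop head with `s = 0`. -/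
def Seg1 (Lay : Layout) (μ : Microarch) (u₀ : State) : Prop :=
  ∀ (others : List Obj) (frames : List (Nat × FrameLayout)) (len i0 koff k0 aoff : Nat) (ue : State) (ret : Word),
    AtEntry (conv u₀) L.imdct_step3_inner_s_loop.entry (spec others frames len i0 koff k0 aoff).frame ret ue →
    (spec others frames len i0 koff k0 aoff).pre ue →
    ReachVia Lay μ WayInv ue (fun w => AtHead u₀ others frames len i0 koff k0 aoff ue ret 0 w)

/-- **Segment 2** (body: 8 float pairs, 16 checks, `ee0 −= k0`, `ee2 −= k0`, `--i`): to the head with `s + 1`. -/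
def Seg2 (Lay : Layout) (μ : Microarch) (u₀ : State) : Prop :=
  ∀ (others : List Obj) (frames : List (Nat × FrameLayout)) (len i0 koff k0 aoff : Nat) (ue : State) (ret : Word) (s : Nat)
    (v : State),
    AtBody u₀ others frames len i0 koff k0 aoff ue ret s v →
    ReachVia Lay μ WayInv v (fun w => AtHead u₀ others frames len i0 koff k0 aoff ue ret (s + 1) w)

/-- **Segment 3** (loop test + epilogue): into the body (`s < n'`), or to the state after the `ret` (`s = n'`). -/
def Seg3 (Lay : Layout) (μ : Microarch) (u₀ : State) : Prop :=
  ∀ (others : List Obj) (frames : List (Nat × FrameLayout)) (len i0 koff k0 aoff : Nat) (ue : State) (ret : Word) (s : Nat)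
    (v : State),
    AtHead u₀ others frames len i0 koff k0 aoff ue ret s v →
    ReachVia Lay μ WayInv v (fun w => AtBody u₀ others frames len i0 koff k0 aoff ue ret s w ∨
      Returned (conv u₀) (spec others frames len i0 koff k0 aoff) ue ret w)

end imdct_step3_inner_s_loop

/-! ### `imdct_step3_inner_s_loop_ld654` -/

/-- **`imdct_step3_inner_s_loop_ld654(edi = n', rsi = e, edx = i_off, rcx = A, r8d = base_n)`** (CONTRACTS 34), ghosts `len
i0`: `0 ≤ n'` and `16 n' < 2³¹` (`shl ebp, 4` in 32 bits), `i_off = i0`, `0 ≤ base_n` as an `int`; the float `A[base_n >> 3]` (read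
before the loop) is live; the `16 n'` floats `e[i0 − 16 n' + 1 .. i0]` lie in `e[0 .. len)`, whose `4 len` bytes are live.
(`base = z0 − 64 n'` bytes is then a natural number: the UNSIGNED `while (z > base)` exits exactly at `z = base`,
`Mdct.Ld654.test`.) Overwrites that run (opaque), through its own stores and the two calls of iter_54 per iteration. Its own 176
bytes of stack (six pushes, `sub rsp, 28H`, the return address of the call of iter_54, its 80); no shadow byte is written. -/
def imdct_step3_inner_s_loop_ld654.spec (others : List Obj) (frames : List (Nat × FrameLayout)) (len i0 : Nat) : Spec where
  pre u :=
    ShadowPre others frames u ∧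
    16 * arg32 u .rdi < 2 ^ 31 ∧
    arg32 u .rdx = i0 ∧
    arg32 u .r8 < 2 ^ 31 ∧
    16 * arg32 u .rdi ≤ i0 + 1 ∧
    i0 < len ∧
    LiveBytes others frames (u.reg .rsi).toNat (4 * len) ∧
    LiveBytes others frames ((u.reg .rcx).toNat + 4 * (arg32 u .r8 / 8)) 4
  post u v :=
    ShadowUntouched u.mem v.mem
  frame := 176
  writes u :=
    [⟨(u.reg .rsi).toNat + 4 * (i0 + 1 - 16 * arg32 u .rdi), (u.reg .rsi).toNat + 4 * (i0 + 1)⟩]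

@[vspec] theorem imdct_step3_inner_s_loop_ld654.spec_frame (others : List Obj) (frames : List (Nat × FrameLayout))
    (len i0 : Nat) : (imdct_step3_inner_s_loop_ld654.spec others frames len i0).frame = 176 := id rfl

@[vspec] theorem imdct_step3_inner_s_loop_ld654.spec_writes (others : List Obj) (frames : List (Nat × FrameLayout))
    (len i0 : Nat) (u : State) :
    (imdct_step3_inner_s_loop_ld654.spec others frames len i0).writes u =
      [⟨(u.reg .rsi).toNat + 4 * (i0 + 1 - 16 * arg32 u .rdi), (u.reg .rsi).toNat + 4 * (i0 + 1)⟩] := id rfl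

namespace imdct_step3_inner_s_loop_ld654

/-- **The loop invariant of imdct_step3_inner_s_loop_ld654** (loop 2620, head `loop1`) after `t` iterations: `rbx = z = z0 − 64 t`,
`r15 = base = z0 − 64 n'` (bytes; `z0 = e + 4 i0`); steady `rsp = ue.rsp − 88`. The twiddle factor A2 is an opaque float in the
slot `[rsp]`; r12 (set in every iteration), ebp, r13d, r14d and the float scratch `[rsp + 4 .. rsp + 20H)` are dead at the cuts. -/
structure Loop (u₀ : State) (others : List Obj) (frames : List (Nat × FrameLayout)) (len i0 : Nat) (ue : State)
    (ret : Word) (t : Nat) (v : State) : Prop where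
  /-- the frame, the footprint so far, the entry facts -/
  body : InBody6 u₀ (spec others frames len i0) L.imdct_step3_inner_s_loop_ld654.entry 88 ue ret v
  /-- at most `n'` iterations are done -/
  le : t ≤ arg32 ue .rdi
  /-- `rbx = z0 − 64 t` -/
  z : (v.reg .rbx).toNat + 64 * t = (ue.reg .rsi).toNat + 4 * i0
  /-- `r15 = z0 − 64 n'` -/
  base : (v.reg .r15).toNat + 64 * arg32 ue .rdi = (ue.reg .rsi).toNat + 4 * i0

/-- At the loop head `loop1` (`cmp r15, rbx ; jb body`, unsigned `base < z`): the invariant. -/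
def AtHead (u₀ : State) (others : List Obj) (frames : List (Nat × FrameLayout)) (len i0 : Nat) (ue : State)
    (ret : Word) (t : Nat) (v : State) : Prop :=
  v.rip = L.imdct_step3_inner_s_loop_ld654.loop1 ∧ Loop u₀ others frames len i0 ue ret t v

/-- At the first instruction of the body `cut1`: the invariant and `t < n'`. -/
def AtBody (u₀ : State) (others : List Obj) (frames : List (Nat × FrameLayout)) (len i0 : Nat) (ue : State)
    (ret : Word) (t : Nat) (v : State) : Prop :=
  v.rip = L.imdct_step3_inner_s_loop_ld654.cut1 ∧ Loop u₀ others frames len i0 ue ret t v ∧ t < arg32 ue .rdi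

/-- **Segment 1** (prologue, the A2 load with its check, `z` / `base` set-up): to the loop head with `t = 0`. -/
def Seg1 (Lay : Layout) (μ : Microarch) (u₀ : State) : Prop :=
  ∀ (others : List Obj) (frames : List (Nat × FrameLayout)) (len i0 : Nat) (ue : State) (ret : Word),
    AtEntry (conv u₀) L.imdct_step3_inner_s_loop_ld654.entry (spec others frames len i0).frame ret ue →
    (spec others frames len i0).pre ue →
    ReachVia Lay μ WayInv ue (fun w => AtHead u₀ others frames len i0 ue ret 0 w)

/-- **Segment 2** (body: 16 loads with their checks, butterflies, `iter_54(z)`, `iter_54(z − 8)`, `z −= 16`): to the head with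
`t + 1`. -/
def Seg2 (Lay : Layout) (μ : Microarch) (u₀ : State) : Prop :=
  ∀ (others : List Obj) (frames : List (Nat × FrameLayout)) (len i0 : Nat) (ue : State) (ret : Word) (t : Nat) (v : State),
    AtBody u₀ others frames len i0 ue ret t v →
    ReachVia Lay μ WayInv v (fun w => AtHead u₀ others frames len i0 ue ret (t + 1) w)

/-- **Segment 3** (loop test + epilogue): into the body (`t < n'`), or to the state after the `ret` (`t = n'`). -/
def Seg3 (Lay : Layout) (μ : Microarch) (u₀ : State) : Prop :=
  ∀ (others : List Obj) (frames : List (Nat × FrameLayout)) (len i0 : Nat) (ue : State) (ret : Word) (t : Nat) (v : State),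
    AtHead u₀ others frames len i0 ue ret t v →
    ReachVia Lay μ WayInv v (fun w => AtBody u₀ others frames len i0 ue ret t w ∨
      Returned (conv u₀) (spec others frames len i0) ue ret w)

end imdct_step3_inner_s_loop_ld654

end Vorbis.Spec
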